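-- pv_equiv track=rewrite | github.com/german-webdev/voodoo-loader | src/voodoo_loader/main_window.py | _reorder_queued_ids
-- ===== SOURCE A (Python) =====
-- def _reorder_queued_ids(queued_ids: list[str], selected_ids: set[str], action: str) -> list[str]:
--     reordered = list(queued_ids)
--
--     if action == "up":
--         for index in range(1, len(reordered)):
--             if reordered[index] in selected_ids and reordered[index - 1] not in selected_ids:
--                 reordered[index - 1], reordered[index] = reordered[index], reordered[index - 1]
--         return reordered
--
--     if action == "down":
--         for index in range(len(reordered) - 2, -1, -1):
--             if reordered[index] in selected_ids and reordered[index + 1] not in selected_ids: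
--                 reordered[index], reordered[index + 1] = reordered[index + 1], reordered[index]
--         return reordered
--
--     selected_ordered = [item_id for item_id in reordered if item_id in selected_ids]
--     unselected_ordered = [item_id for item_id in reordered if item_id not in selected_ids]
--
--     if action == "top":
--         return [*selected_ordered, *unselected_ordered]
--     if action == "bottom":
--         return [*unselected_ordered, *selected_ordered]
--
--     return reordered
-- ===== SOURCE B (Python) =====
-- def _bubble(items, selected_ids):
--     # scan left-to-right: an unselected element followed by a selected run
--     # is emitted after the whole run (it "swaps past" the block in one move)
--     out = []
--     i, n = 0, len(items)
--     while i < n: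
--         x = items[i]
--         if x not in selected_ids and i + 1 < n and items[i + 1] in selected_ids:
--             j = i + 1
--             while j < n and items[j] in selected_ids:
--                 out.append(items[j])
--                 j += 1
--             out.append(x)
--             i = j
--         else:
--             out.append(x)
--             i += 1
--     return out
--
--
-- def _reorder_queued_ids(queued_ids: list[str], selected_ids: set[str], action: str) -> list[str]:
--     if action == "up":
--         return _bubble(queued_ids, selected_ids)
--     if action == "down":
--         return _bubble(queued_ids[::-1], selected_ids)[::-1]
--     if action == "top" or action == "bottom":
--         sel, unsel = [], []
--         for item_id in queued_ids:
--             (sel if item_id in selected_ids else unsel).append(item_id)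
--         return sel + unsel if action == "top" else unsel + sel
--     return list(queued_ids)
-- ===== Notes on version B (the rewrite author's own statement) =====
-- stated objective: alternative
-- what changed: A's up/down branches do in-place adjacent swaps over an index range; B builds a fresh list in one forward scan that moves each whole selected run past its unselected predecessor in a single block move (down = reverse-up-reverse), and top/bottom use a single partition pass instead of two filter passes.
import Mathlib
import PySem

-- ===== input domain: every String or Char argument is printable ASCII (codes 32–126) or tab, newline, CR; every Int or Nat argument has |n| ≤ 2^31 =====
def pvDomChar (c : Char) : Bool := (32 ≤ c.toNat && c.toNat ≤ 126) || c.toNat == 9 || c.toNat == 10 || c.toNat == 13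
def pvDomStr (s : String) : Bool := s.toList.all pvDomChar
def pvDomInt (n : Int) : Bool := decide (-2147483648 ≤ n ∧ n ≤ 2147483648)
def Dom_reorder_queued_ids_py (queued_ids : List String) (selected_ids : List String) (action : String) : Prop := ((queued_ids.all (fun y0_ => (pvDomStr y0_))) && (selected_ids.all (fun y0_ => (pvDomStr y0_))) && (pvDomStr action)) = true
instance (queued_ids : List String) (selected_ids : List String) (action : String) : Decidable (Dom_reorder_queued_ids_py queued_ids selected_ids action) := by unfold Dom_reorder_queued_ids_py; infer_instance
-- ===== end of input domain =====

-- B replaces A's in-place adjacent-swap loops by a single left-to-right scan that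
-- moves each whole selected run in one block move ("alternative" decomposition,
-- same O(n) cost); return values are proved identical, no mutation is observable.

-- ===== PORT A =====
-- the "up" loop body: at index i, swap positions i-1 and i if a[i] selected and a[i-1] not
def pvStepUp (sel : List String) (l : List String) (i : Nat) : List String :=
  if sel.contains (l.getD i "") ∧ ¬ sel.contains (l.getD (i - 1) "") then
    (l.set (i - 1) (l.getD i "")).set i (l.getD (i - 1) "")
  else l

-- the "down" loop body: at index i, swap positions i and i+1 if a[i] selected and a[i+1] not
def pvStepDown (sel : List String) (l : List String) (i : Nat) : List String :=
  if sel.contains (l.getD i "") ∧ ¬ sel.contains (l.getD (i + 1) "") then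
    (l.set i (l.getD (i + 1) "")).set (i + 1) (l.getD i "")
  else l

def reorder_queued_ids_py (queued_ids : List String) (selected_ids : List String) (action : String) : List String :=
  let reordered := queued_ids
  if action = "up" then
    -- for index in range(1, len(reordered)) — indices 1 .. n-1
    (List.range' 1 (reordered.length - 1)).foldl (pvStepUp selected_ids) reordered
  else if action = "down" then
    -- for index in range(len(reordered)-2, -1, -1) — indices n-2 .. 0
    (List.range' 0 (reordered.length - 1)).reverse.foldl (pvStepDown selected_ids) reordered
  else
    let selected_ordered := reordered.filter (fun x => selected_ids.contains x)
    let unselected_ordered := reordered.filter (fun x => ¬ selected_ids.contains x)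
    if action = "top" then selected_ordered ++ unselected_ordered
    else if action = "bottom" then unselected_ordered ++ selected_ordered
    else reordered

-- ===== PORT B =====
-- B's _bubble: consume the list front-to-back; an unselected element directly
-- before a selected run is emitted after the whole run, in one step
def pvBubble (sel : List String) : List String → List String
  | [] => []
  | x :: rest =>
    if ¬ sel.contains x ∧ rest.head?.any sel.contains then
      rest.takeWhile sel.contains ++ x :: pvBubble sel (rest.dropWhile sel.contains)
    else
      x :: pvBubble sel rest
  termination_by l => l.length
  decreasing_by
    · simpa using Nat.lt_succ_of_le (List.length_dropWhile_le sel.contains rest)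
    · simp

def reorder_queued_ids_py_alt (queued_ids : List String) (selected_ids : List String) (action : String) : List String :=
  if action = "up" then
    pvBubble selected_ids queued_ids
  else if action = "down" then
    (pvBubble selected_ids queued_ids.reverse).reverse
  else if action = "top" ∨ action = "bottom" then
    let p := queued_ids.partition (fun x => selected_ids.contains x)
    if action = "top" then p.1 ++ p.2 else p.2 ++ p.1
  else queued_ids

-- ===== PRECONDITION & SPEC =====
def Spec_reorder_queued_ids_py (queued_ids : List String) (selected_ids : List String) (action : String) (out : List String) : Prop := out = reorder_queued_ids_py_alt queued_ids selected_ids action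
instance (queued_ids : List String) (selected_ids : List String) (action : String) (out : List String) : Decidable (Spec_reorder_queued_ids_py queued_ids selected_ids action out) := by unfold Spec_reorder_queued_ids_py; infer_instance

-- ===== CLAIM (what is proved, stated in full; the proofs are below) =====
def Claim_equal_reorder_queued_ids_py : Prop := ∀ (queued_ids : List String) (selected_ids : List String) (action : String), Dom_reorder_queued_ids_py queued_ids selected_ids action → Spec_reorder_queued_ids_py queued_ids selected_ids action (reorder_queued_ids_py queued_ids selected_ids action)

-- ===== LEMMAS AND PROOFS =====

-- a recursive characterisation of A's swap loops: look at adjacent pairs,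
-- swapping pulls the selected element forward and carries the unselected one
def pvBub (sel : List String) : List String → List String
  | [] => []
  | [x] => [x]
  | x :: y :: r =>
    if sel.contains y ∧ ¬ sel.contains x then y :: pvBub sel (x :: r)
    else x :: pvBub sel (y :: r)

theorem pvBub_nil (sel : List String) : pvBub sel [] = [] := by simp [pvBub]
theorem pvBub_single (sel : List String) (x : String) : pvBub sel [x] = [x] := by simp [pvBub]
theorem pvBub_cons₂ (sel : List String) (x y : String) (r : List String) :
    pvBub sel (x :: y :: r) = if sel.contains y ∧ ¬ sel.contains x then y :: pvBub sel (x :: r)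
      else x :: pvBub sel (y :: r) := by rw [pvBub]

theorem pvBubble_nil (sel : List String) : pvBubble sel [] = [] := by simp [pvBubble]
theorem pvBubble_cons (sel : List String) (x : String) (rest : List String) :
    pvBubble sel (x :: rest) =
      if ¬ sel.contains x ∧ rest.head?.any sel.contains then
        rest.takeWhile sel.contains ++ x :: pvBubble sel (rest.dropWhile sel.contains)
      else x :: pvBubble sel rest := by rw [pvBubble]

-- list surgery helpers
theorem pv_getD_mid (a : List String) (x : String) (t : List String) (d : String) :
    (a ++ x :: t).getD a.length d = x := by
  simp [List.getD]

theorem pv_set_mid (a : List String) (x z : String) (t : List String) :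
    (a ++ x :: t).set a.length z = a ++ z :: t := by
  simp [List.set_append_right]

-- A's up loop, started on done ++ cur :: rest with indices |done|+1 .., equals done ++ pvBub (cur :: rest)
theorem pv_up_inv (sel : List String) (rest : List String) : ∀ (done : List String) (cur : String),
    (List.range' (done.length + 1) rest.length).foldl (pvStepUp sel) (done ++ cur :: rest)
      = done ++ pvBub sel (cur :: rest) := by
  induction rest with
  | nil => intro done cur; simp [pvBub_single]
  | cons y r ih =>
    intro done cur
    rw [List.length_cons, List.range'_succ, List.foldl_cons]
    have hstep : pvStepUp sel (done ++ cur :: y :: r) (done.length + 1)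
        = if sel.contains y ∧ ¬ sel.contains cur
          then (done ++ [y]) ++ cur :: r else (done ++ [cur]) ++ y :: r := by
      have h1 : (done ++ cur :: y :: r).getD (done.length + 1) "" = y := by
        have := pv_getD_mid (done ++ [cur]) y r ""
        simpa using this
      have h0 : (done ++ cur :: y :: r).getD (done.length + 1 - 1) "" = cur := by
        simpa using pv_getD_mid done cur (y :: r) ""
      unfold pvStepUp
      rw [h1, h0]
      split
      · have e1 : (done ++ cur :: y :: r).set (done.length + 1 - 1) y = done ++ y :: y :: r := by
          simpa using pv_set_mid done cur y (y :: r)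
        rw [e1]
        have e2 : (done ++ y :: y :: r).set (done.length + 1) cur = done ++ y :: cur :: r := by
          simpa using pv_set_mid (done ++ [y]) y cur r
        rw [e2]; simp
      · simp
    rw [hstep]
    by_cases h : sel.contains y = true ∧ ¬ sel.contains cur = true
    · rw [if_pos h, pvBub_cons₂, if_pos h]
      simpa using ih (done ++ [y]) cur
    · rw [if_neg h, pvBub_cons₂, if_neg h]
      simpa using ih (done ++ [cur]) y

theorem pv_up_eq (sel : List String) (xs : List String) :
    (List.range' 1 (xs.length - 1)).foldl (pvStepUp sel) xs = pvBub sel xs := by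
  cases xs with
  | nil => simp [pvBub_nil]
  | cons x rest =>
    have := pv_up_inv sel rest [] x
    simpa using this

-- A's down loop on pre ++ cur :: suf with indices |pre|-1 .. 0 equals (pvBub (cur :: pre.reverse)).reverse ++ suf
theorem pv_down_inv (sel : List String) : ∀ (pre : List String) (cur : String) (suf : List String),
    (List.range' 0 pre.length).reverse.foldl (pvStepDown sel) (pre ++ cur :: suf)
      = (pvBub sel (cur :: pre.reverse)).reverse ++ suf := by
  intro pre
  induction pre using List.reverseRecOn with
  | nil => intro cur suf; simp [pvBub_single]
  | append_singleton p y ih =>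
    intro cur suf
    have hrange : (List.range' 0 (p ++ [y]).length).reverse
        = p.length :: (List.range' 0 p.length).reverse := by
      simp [List.range'_1_concat]
    rw [hrange, List.foldl_cons]
    have hl : (p ++ [y]) ++ cur :: suf = p ++ y :: cur :: suf := by simp
    rw [hl]
    have hstep : pvStepDown sel (p ++ y :: cur :: suf) p.length
        = if sel.contains y ∧ ¬ sel.contains cur
          then p ++ cur :: y :: suf else p ++ y :: cur :: suf := by
      have h0 : (p ++ y :: cur :: suf).getD p.length "" = y := pv_getD_mid p y (cur :: suf) ""
      have h1 : (p ++ y :: cur :: suf).getD (p.length + 1) "" = cur := by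
        have := pv_getD_mid (p ++ [y]) cur suf ""
        simpa using this
      unfold pvStepDown
      rw [h0, h1]
      split
      · have e1 : (p ++ y :: cur :: suf).set p.length cur = p ++ cur :: cur :: suf :=
          pv_set_mid p y cur (cur :: suf)
        rw [e1]
        have e2 : (p ++ cur :: cur :: suf).set (p.length + 1) y = p ++ cur :: y :: suf := by
          have := pv_set_mid (p ++ [cur]) cur y suf
          simpa using this
        rw [e2]
      · rfl
    rw [hstep]
    have hrev : (p ++ [y]).reverse = y :: p.reverse := by simp
    rw [hrev, pvBub_cons₂]
    by_cases h : sel.contains y = true ∧ ¬ sel.contains cur = true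
    · rw [if_pos h, if_pos h, ih cur (y :: suf)]
      simp
    · rw [if_neg h, if_neg h, ih y (cur :: suf)]
      simp

theorem pv_down_eq (sel : List String) (xs : List String) :
    (List.range' 0 (xs.length - 1)).reverse.foldl (pvStepDown sel) xs
      = (pvBub sel xs.reverse).reverse := by
  induction xs using List.reverseRecOn with
  | nil => simp [pvBub_nil]
  | append_singleton p y _ =>
    have := pv_down_inv sel p y []
    simpa using this

-- B's one-shot block move agrees with the carried-element recursion
theorem pv_bub_carry (sel : List String) (x : String) (hx : ¬ sel.contains x = true) :
    ∀ rest, pvBub sel (x :: rest)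
      = rest.takeWhile sel.contains ++ x :: pvBub sel (rest.dropWhile sel.contains) := by
  intro rest
  induction rest generalizing x with
  | nil => simp [pvBub_single, pvBub_nil]
  | cons y r ih =>
    by_cases hy : sel.contains y = true
    · rw [pvBub_cons₂, if_pos ⟨hy, hx⟩, ih x hx,
        List.takeWhile_cons_of_pos hy, List.dropWhile_cons_of_pos hy, List.cons_append]
    · rw [pvBub_cons₂, if_neg (fun hc => hy hc.1),
        List.takeWhile_cons_of_neg hy, List.dropWhile_cons_of_neg hy, List.nil_append]

theorem pv_bubble_eq_bub (sel : List String) : ∀ xs, pvBubble sel xs = pvBub sel xs := by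
  intro xs
  induction hn : xs.length using Nat.strong_induction_on generalizing xs with
  | _ n ih =>
  cases xs with
  | nil => rw [pvBubble_nil, pvBub_nil]
  | cons x rest =>
    rw [pvBubble_cons]
    by_cases hc : (¬ sel.contains x = true ∧ rest.head?.any sel.contains = true)
    · rw [if_pos hc]
      have hlen : (rest.dropWhile sel.contains).length < n := by
        subst hn
        exact Nat.lt_succ_of_le (rest.length_dropWhile_le _)
      rw [ih _ hlen _ rfl, pv_bub_carry sel x hc.1 rest]
    · rw [if_neg hc]
      have hrest : pvBubble sel rest = pvBub sel rest := by
        subst hn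
        exact ih _ (by simp) _ rfl
      rw [hrest]
      cases rest with
      | nil => rw [pvBub_nil, pvBub_single]
      | cons y r =>
        by_cases hx : sel.contains x = true
        · rw [pvBub_cons₂, if_neg (fun hc' => hc'.2 hx)]
        · have hy : ¬ sel.contains y = true := by
            intro hy
            have hy' : y ∈ sel := by simpa using hy
            exact hc ⟨hx, by simpa using hy'⟩
          rw [pvBub_cons₂, if_neg (fun hc' => hy hc'.1)]

-- ===== VERDICT (by name: the statement is the Claim_ definition above) =====
theorem reorder_queued_ids_py_spec : Claim_equal_reorder_queued_ids_py := by
  intro qs sel act _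
  unfold Spec_reorder_queued_ids_py reorder_queued_ids_py reorder_queued_ids_py_alt
  by_cases hu : act = "up"
  · subst hu
    simp only [reduceIte]
    rw [pv_up_eq, pv_bubble_eq_bub]
  · by_cases hd : act = "down"
    · subst hd
      rw [if_neg hu, if_neg hu, if_pos rfl, if_pos rfl, pv_down_eq, pv_bubble_eq_bub]
    · by_cases ht : act = "top"
      · subst ht
        simp [List.partition_eq_filter_filter]
        exact List.filter_congr (fun z _ => by simp [Function.comp])
      · by_cases hb : act = "bottom"
        · subst hb
          simp [List.partition_eq_filter_filter]
          exact List.filter_congr (fun z _ => by simp [Function.comp])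
        · simp [hu, hd, ht, hb]
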